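/-
  THE TOKENS jsmn SHOULD PRODUCE FOR A JSON TEXT: `Layout.tokens`.

  One token per node of the tree, every key of an object being a node (a STRING token) between the object and the member's value, in
  PRE-ORDER (= in the order of their first bytes in the text). For the layout `l` rendered at byte offset `pos` of the text, its first token
  having index `idx` in the token array, and `parent` being the index of the enclosing token (-1 at top level):
    type    1 object, 2 array, 4 string (also keys), 8 primitive (number, true, false, null)
    start   offset of the first byte (`{`, `[`, first character of a primitive); for a string: of the first byte AFTER the opening quote
    end     offset just behind the last byte (behind `}` / `]`); for a string: offset OF the closing quote
    size    object: the number of its keys; key: 1; array: the number of its elements; any other string, any primitive: 0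
    parent  the enclosing token: for an element of an array the array, for a key the object, for a member's VALUE the KEY
  `parent` is stored only with JSMN_PARENT_LINKS; without, the field does not exist in C and the model leaves it alone: `stamp`.
-/
import Json.Grammar
import Json.Jsmn.Model

namespace Json
open Jsmn

mutual
/-- **The expected tokens** of a layout rendered at offset `pos`, first token index `idx`, enclosing token `parent`. -/
def Layout.tokens : Layout → (pos idx : Nat) → (parent : Int) → List Token
  | .null, pos, _, parent => [⟨JSMN_PRIMITIVE, pos, (pos + 4 : Nat), 0, parent⟩]
  | .true, pos, _, parent => [⟨JSMN_PRIMITIVE, pos, (pos + 4 : Nat), 0, parent⟩]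
  | .false, pos, _, parent => [⟨JSMN_PRIMITIVE, pos, (pos + 5 : Nat), 0, parent⟩]
  | .number t, pos, _, parent => [⟨JSMN_PRIMITIVE, pos, (pos + t.length : Nat), 0, parent⟩]
  | .string b, pos, _, parent => [⟨JSMN_STRING, (pos + 1 : Nat), (pos + 1 + b.length : Nat), 0, parent⟩]
  | .array ws items, pos, idx, parent =>
    ⟨JSMN_ARRAY, pos, (pos + (1 + ws.length + items.text.length + 1) : Nat), items.length, parent⟩ ::
      items.tokens (pos + 1 + ws.length) (idx + 1) idx
  | .object ws members, pos, idx, parent =>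
    ⟨JSMN_OBJECT, pos, (pos + (1 + ws.length + members.text.length + 1) : Nat), members.length, parent⟩ ::
      members.tokens (pos + 1 + ws.length) (idx + 1) idx
/-- The tokens of the elements of the array with token index `parent`, the first element's leading whitespace starting at `pos`. -/
def Items.tokens : Items → (pos idx : Nat) → (parent : Int) → List Token
  | .nil, _, _, _ => []
  | .cons pre item post rest, pos, idx, parent =>
    item.tokens (pos + pre.length) idx parent ++
      rest.tokens (pos + pre.length + item.text.length + post.length + 1) (idx + item.count) parent
/-- The tokens of the members of the object with token index `parent`: for each member the key, then the value's (their parent: the key). -/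
def Members.tokens : Members → (pos idx : Nat) → (parent : Int) → List Token
  | .nil, _, _, _ => []
  | .cons pre key mid pre' val post rest, pos, idx, parent =>
    ⟨JSMN_STRING, (pos + pre.length + 1 : Nat), (pos + pre.length + 1 + key.length : Nat), 1, parent⟩ ::
      val.tokens (pos + pre.length + 1 + key.length + 1 + mid.length + 1 + pre'.length) (idx + 1) idx ++
      rest.tokens (pos + pre.length + 1 + key.length + 1 + mid.length + 1 + pre'.length + val.text.length + post.length + 1)
        (idx + 1 + val.count) parent
end

/-- What is stored for an expected token `e` in a slot that held `old`: `e`, except that without JSMN_PARENT_LINKS the `parent` field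
keeps what it held. -/
def stampTok (cfg : Config) (e old : Token) : Token := if cfg.parentLinks then e else { e with parent := old.parent }

/-- Expected tokens stored over old ones. -/
def stamp (cfg : Config) (expected old : List Token) : List Token := List.zipWith (stampTok cfg) expected old

end Json
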